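-- pv_equiv track=rewrite | github.com/Perryong/sg4danalyser | analyzer.py | select_digits_lowest_occurrence
-- ===== SOURCE A (Python) =====
-- def select_digits_lowest_occurrence(digit_counts):
--     """
--     Select only the digit(s) with the lowest occurrence rate.
--     If multiple digits have the same minimum occurrence, select all of them.
--
--     Args:
--         digit_counts: Dictionary with digit as key and count as value
--
--     Returns:
--         list: List of selected first digits (as strings) with lowest occurrence
--     """
--     if not digit_counts:
--         return []
--
--     # Find the minimum occurrence count
--     min_count = min(digit_counts.values())
--
--     # Select all digits with the minimum occurrence count
--     selected_digits = [
--         digit for digit, count in digit_counts.items()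
--         if count == min_count
--     ]
--
--     return sorted(selected_digits)
-- ===== SOURCE B (Python) =====
-- def select_digits_lowest_occurrence(digit_counts):
--     """Single pass over items, tracking the running minimum and its digits."""
--     min_count = None
--     selected = []
--     for digit, count in digit_counts.items():
--         if min_count is None or count < min_count:
--             min_count = count
--             selected = [digit]
--         elif count == min_count:
--             selected.append(digit)
--     return sorted(selected)
-- ===== Notes on version B (the rewrite author's own statement) =====
-- stated objective: alternative
-- what changed: Replaces the separate min() scan over values plus a filtering comprehension with one traversal of items() that resets/accumulates the current minimum's digits, sorting only the final selection.
import Mathlib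
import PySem

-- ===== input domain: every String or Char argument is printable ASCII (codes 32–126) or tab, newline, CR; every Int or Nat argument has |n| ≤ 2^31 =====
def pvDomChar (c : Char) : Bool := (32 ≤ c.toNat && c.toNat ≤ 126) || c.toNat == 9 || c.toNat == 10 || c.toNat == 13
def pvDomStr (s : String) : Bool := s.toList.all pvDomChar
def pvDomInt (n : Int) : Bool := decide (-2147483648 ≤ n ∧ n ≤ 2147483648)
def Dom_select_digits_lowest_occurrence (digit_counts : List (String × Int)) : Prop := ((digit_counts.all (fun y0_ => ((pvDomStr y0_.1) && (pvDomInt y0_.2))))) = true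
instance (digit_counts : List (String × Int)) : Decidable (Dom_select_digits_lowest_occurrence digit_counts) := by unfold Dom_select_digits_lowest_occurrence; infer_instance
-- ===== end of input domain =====

-- B replaces A's min()-scan-plus-filter with a single pass tracking the running minimum and its digits; same return value, same cost.

-- ===== PORT A =====
def select_digits_lowest_occurrence (digit_counts : List (String × Int)) : List String :=
  let d := PySem.Dict.ofList digit_counts
  if d.items.isEmpty then []
  else
    match PySem.List.min? d.values (fun v => v) with
    | none => []   -- unreachable: values of a nonempty dict are nonempty
    | some min_count =>
      PySem.List.sorted ((d.items.filter (fun p => p.2 = min_count)).map Prod.fst) (fun s => s) false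

-- ===== PORT B =====
def pvStepB (st : Option Int × List String) (kv : String × Int) : Option Int × List String :=
  match st with
  | (none, _) => (some kv.2, [kv.1])
  | (some m, sel) =>
    if kv.2 < m then (some kv.2, [kv.1])
    else if kv.2 = m then (some m, sel ++ [kv.1])
    else (some m, sel)

def select_digits_lowest_occurrence_alt (digit_counts : List (String × Int)) : List String :=
  let d := PySem.Dict.ofList digit_counts
  let st := d.items.foldl pvStepB (none, [])
  PySem.List.sorted st.2 (fun s => s) false

-- ===== PRECONDITION & SPEC =====
def Spec_select_digits_lowest_occurrence (digit_counts : List (String × Int)) (out : List String) : Prop := out = select_digits_lowest_occurrence_alt digit_counts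
instance (digit_counts : List (String × Int)) (out : List String) : Decidable (Spec_select_digits_lowest_occurrence digit_counts out) := by unfold Spec_select_digits_lowest_occurrence; infer_instance

-- ===== CLAIM (what is proved, stated in full; the proofs are below) =====
def Claim_equal_select_digits_lowest_occurrence : Prop := ∀ (digit_counts : List (String × Int)), Dom_select_digits_lowest_occurrence digit_counts → Spec_select_digits_lowest_occurrence digit_counts (select_digits_lowest_occurrence digit_counts)

-- ===== LEMMAS AND PROOFS =====

-- the running minimum only decreases
lemma foldl_min_le_init (t : List (String × Int)) : ∀ a : Int, t.foldl (fun a p => min a p.2) a ≤ a := by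
  induction t with
  | nil => intro a; simp
  | cons x t ih =>
    intro a
    simpa using le_trans (ih (min a x.2)) (min_le_left _ _)

-- invariant of B's fold from a state that already holds a minimum m and its digits sel
lemma foldB_invariant (t : List (String × Int)) : ∀ (m : Int) (sel : List String),
    t.foldl pvStepB (some m, sel) =
      (some (t.foldl (fun a p => min a p.2) m),
       (if t.foldl (fun a p => min a p.2) m = m then sel else []) ++
         (t.filter (fun p => p.2 = t.foldl (fun a p => min a p.2) m)).map Prod.fst) := by
  induction t with
  | nil => intro m sel; simp
  | cons x t ih =>
    intro m sel
    obtain ⟨k, v⟩ := x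
    simp only [List.foldl_cons]
    by_cases hlt : v < m
    · have hmin : min m v = v := by omega
      rw [show pvStepB (some m, sel) (k, v) = (some v, [k]) by simp [pvStepB, hlt]]
      simp only [hmin]
      rw [ih v [k]]
      have hle := foldl_min_le_init t v
      generalize t.foldl (fun a p => min a p.2) v = M at hle ⊢
      have hMne : ¬ (M = m) := by omega
      by_cases hMv : v = M
      · subst hMv; simp [hMne]
      · have h2 : ¬ (M = v) := fun h => hMv h.symm
        simp [hMne, hMv, h2]
    · by_cases heq : v = m
      · rw [show pvStepB (some m, sel) (k, v) = (some m, sel ++ [k]) by simp [pvStepB, heq]]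
        simp only [show min m v = m by omega]
        rw [ih m (sel ++ [k])]
        subst heq
        generalize t.foldl (fun a p => min a p.2) v = M
        by_cases hMm : M = v
        · subst hMm; simp [List.append_assoc]
        · have h2 : ¬ (v = M) := fun h => hMm h.symm
          simp [hMm, h2]
      · rw [show pvStepB (some m, sel) (k, v) = (some m, sel) by simp [pvStepB, hlt, heq]]
        simp only [show min m v = m by omega]
        rw [ih m sel]
        have hle := foldl_min_le_init t m
        generalize t.foldl (fun a p => min a p.2) m = M at hle ⊢
        have h2 : ¬ (v = M) := by omega
        simp [h2]

-- ===== VERDICT (by name: the statement is the Claim_ definition above) =====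
theorem select_digits_lowest_occurrence_spec : Claim_equal_select_digits_lowest_occurrence := by
  intro digit_counts _
  unfold Spec_select_digits_lowest_occurrence
  unfold select_digits_lowest_occurrence select_digits_lowest_occurrence_alt
  cases hitems : (PySem.Dict.ofList digit_counts).items with
  | nil => simp [hitems, PySem.List.sorted]
  | cons x t =>
    obtain ⟨k, v⟩ := x
    simp only [hitems, List.isEmpty_cons, Bool.false_eq_true, if_neg, not_false_iff]
    have hvals : (PySem.Dict.ofList digit_counts).values = v :: t.map Prod.snd := by
      simp [PySem.Dict.values, hitems]
    rw [hvals, PySem.List.min?_id_cons]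
    simp only [List.foldl_cons, List.foldl_map]
    rw [show pvStepB (none, []) (k, v) = (some v, [k]) from rfl, foldB_invariant t v [k]]
    generalize t.foldl (fun a p => min a p.2) v = M
    by_cases hMv : v = M
    · subst hMv; simp
    · have h2 : ¬ (M = v) := fun h => hMv h.symm
      simp [hMv, h2]
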